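-- pv_equiv track=rewrite | github.com/DaPP-P/UniWork | cosc326-etude-2-main/script.py | count_diphthongs
-- ===== SOURCE A (Python) =====
-- vowels = "aeiouy"
--
-- def count_diphthongs(x: str) -> int:
--     count = 0
--     for i in range(len(x) - 2):
--         if (
--             x[i] in vowels
--             and x[i + 1] in vowels
--             and x[i + 2] not in vowels
--         ):
--             count += 1
--     return count
-- ===== SOURCE B (Python) =====
-- import re
--
-- _PAT = re.compile(r'[aeiouy][aeiouy][^aeiouy]')
--
-- def count_diphthongs(x: str) -> int:
--     # Matches can never overlap (the consonant third char blocks any shifted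
--     # match), so findall's non-overlapping count equals the window count.
--     return len(_PAT.findall(x))
-- ===== Notes on version B (the rewrite author's own statement) =====
-- stated objective: idiomatic
-- what changed: Replaced the explicit index loop with three per-position membership checks by a single regex pattern scan (re.findall of [aeiouy][aeiouy][^aeiouy]), correct because matches can never overlap; the C regex engine also makes it measurably faster.
import Mathlib
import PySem

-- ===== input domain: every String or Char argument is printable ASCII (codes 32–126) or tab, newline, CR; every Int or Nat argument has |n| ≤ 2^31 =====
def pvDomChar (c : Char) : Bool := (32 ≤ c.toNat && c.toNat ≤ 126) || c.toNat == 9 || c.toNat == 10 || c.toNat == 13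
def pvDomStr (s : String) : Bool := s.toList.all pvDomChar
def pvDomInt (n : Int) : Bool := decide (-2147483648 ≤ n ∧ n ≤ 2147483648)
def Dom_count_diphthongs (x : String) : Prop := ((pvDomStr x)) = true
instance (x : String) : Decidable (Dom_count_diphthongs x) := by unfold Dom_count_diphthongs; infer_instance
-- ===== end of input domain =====

-- B replaces A's explicit index loop by a single left-to-right regex-style
-- pattern scan (re.findall of [aeiouy][aeiouy][^aeiouy]); equal because
-- matches can never overlap (the consonant third char blocks a shifted match).

-- ===== PORT A =====
def pvVowelsA : String := "aeiouy"

-- Python 'x[i] in vowels': x[i] is a 1-char string, tested by substring membership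
def pvInVowelsA (oc : Option Char) : Bool :=
  match oc with
  | some c => PySem.Str.isIn (String.ofList [c]) pvVowelsA
  | none => false

def count_diphthongs (x : String) : Int :=
  (PySem.List.pyRange 0 (PySem.Str.len x - 2)).foldl
    (fun count i =>
      if pvInVowelsA (PySem.Str.pyGet? x i)
          && pvInVowelsA (PySem.Str.pyGet? x (i + 1))
          && !pvInVowelsA (PySem.Str.pyGet? x (i + 2))
      then count + 1 else count) 0

-- ===== PORT B =====
def pvIsVowelB (c : Char) : Bool := ['a', 'e', 'i', 'o', 'u', 'y'].contains c

-- re.findall's leftmost non-overlapping scan for [aeiouy][aeiouy][^aeiouy]: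
-- on a match consume all three chars, otherwise advance by one; count matches.
def pvRegexScan : List Char → Int
  | a :: b :: c :: t =>
    if pvIsVowelB a && pvIsVowelB b && !pvIsVowelB c then 1 + pvRegexScan t
    else pvRegexScan (b :: c :: t)
  | _ => 0
termination_by l => l.length
decreasing_by all_goals (simp; try omega)

def count_diphthongs_alt (x : String) : Int := pvRegexScan x.toList

-- ===== PRECONDITION & SPEC =====
def Spec_count_diphthongs (x : String) (out : Int) : Prop := out = count_diphthongs_alt x
instance (x : String) (out : Int) : Decidable (Spec_count_diphthongs x out) := by unfold Spec_count_diphthongs; infer_instance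

-- ===== CLAIM (what is proved, stated in full; the proofs are below) =====
def Claim_equal_count_diphthongs : Prop := ∀ (x : String), Dom_count_diphthongs x → Spec_count_diphthongs x (count_diphthongs x)

-- ===== LEMMAS AND PROOFS =====

-- A's per-index test, over the char list
def pvTestA (xs : List Char) (i : Int) : Bool :=
  pvInVowelsA (PySem.List.pyGet? xs i)
    && pvInVowelsA (PySem.List.pyGet? xs (i + 1))
    && !pvInVowelsA (PySem.List.pyGet? xs (i + 2))

lemma pvInVowelsA_eq (c : Char) : pvInVowelsA (some c) = pvIsVowelB c := by
  have key : PySem.Str.isIn (String.ofList [c]) pvVowelsA = true ↔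
      c ∈ ['a', 'e', 'i', 'o', 'u', 'y'] := by
    rw [PySem.Str.isIn_iff_infix]
    simp [pvVowelsA, List.singleton_infix_iff]
  show PySem.Str.isIn (String.ofList [c]) pvVowelsA = pvIsVowelB c
  cases hb : PySem.Str.isIn (String.ofList [c]) pvVowelsA with
  | true => simp [pvIsVowelB, key.1 hb]
  | false =>
    have hnot : ¬ c ∈ ['a', 'e', 'i', 'o', 'u', 'y'] := fun hm => by
      rw [key.2 hm] at hb; cases hb
    simp [pvIsVowelB, hnot]

lemma pvA_eq_countP (x : String) :
    count_diphthongs x =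
      (List.countP (pvTestA x.toList)
        (PySem.List.pyRange 0 ((x.toList.length : Int) - 2)) : Int) := by
  show (PySem.List.pyRange 0 ((x.toList.length : Int) - 2)).foldl
      (fun count i => if pvTestA x.toList i then count + 1 else count) 0 = _
  rw [PySem.List.foldl_count_if]
  simp

lemma pvGet_cons_succ (a : Char) (xs : List Char) (k : Nat) :
    PySem.List.pyGet? (a :: xs) ((k : Int) + 1) = PySem.List.pyGet? xs (k : Int) := by
  rw [show ((k : Int) + 1) = ((k + 1 : Nat) : Int) from by push_cast; ring,
    PySem.List.pyGet?_natCast, PySem.List.pyGet?_natCast]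
  simp

lemma pvTestA_shift (a : Char) (xs : List Char) (k : Nat) :
    pvTestA (a :: xs) (1 + (k : Int)) = pvTestA xs (0 + (k : Int)) := by
  unfold pvTestA
  rw [show (1 : Int) + (k : Int) = (k : Int) + 1 from by ring]
  rw [show ((k : Int) + 1) + 1 = ((k + 1 : Nat) : Int) + 1 from by push_cast; ring]
  rw [show ((k : Int) + 1) + 2 = ((k + 2 : Nat) : Int) + 1 from by push_cast; ring]
  rw [pvGet_cons_succ a xs k, pvGet_cons_succ a xs (k + 1), pvGet_cons_succ a xs (k + 2)]
  rw [show (0 : Int) + (k : Int) = (k : Int) from by ring]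
  rw [show ((k : Int) + 1) = ((k + 1 : Nat) : Int) from by push_cast; ring]
  rw [show ((k : Int) + 2) = ((k + 2 : Nat) : Int) from by push_cast; ring]

lemma pvCountP_shift (a : Char) (xs : List Char) :
    List.countP (pvTestA (a :: xs)) (PySem.List.pyRange 1 ((xs.length : Int) - 1)) =
      List.countP (pvTestA xs) (PySem.List.pyRange 0 ((xs.length : Int) - 2)) := by
  rw [PySem.List.pyRange_one 1, PySem.List.pyRange_one 0]
  rw [show ((xs.length : Int) - 1 - 1).toNat = ((xs.length : Int) - 2 - 0).toNat from by omega]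
  rw [List.countP_map, List.countP_map]
  have hfun : (pvTestA (a :: xs) ∘ fun k : Nat => (1 : Int) + (k : Int)) =
      (pvTestA xs ∘ fun k : Nat => (0 : Int) + (k : Int)) :=
    funext fun k => pvTestA_shift a xs k
  rw [hfun]

lemma pvTestA_zero (u v : Char) (rest : List Char) :
    pvTestA (u :: v :: rest) 0 =
      (pvIsVowelB u && pvIsVowelB v && !pvInVowelsA rest[0]?) := by
  have g0 : PySem.List.pyGet? (u :: v :: rest) (0 : Int) = some u := by
    simpa using PySem.List.pyGet?_natCast (u :: v :: rest) 0
  have g1 : PySem.List.pyGet? (u :: v :: rest) ((0 : Int) + 1) = some v := by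
    simpa using PySem.List.pyGet?_natCast (u :: v :: rest) 1
  have g2 : PySem.List.pyGet? (u :: v :: rest) ((0 : Int) + 2) = rest[0]? := by
    simpa using PySem.List.pyGet?_natCast (u :: v :: rest) 2
  unfold pvTestA
  rw [g0, g1, g2, pvInVowelsA_eq, pvInVowelsA_eq]

-- dropping a head on which no window can start
lemma pvCount_skip (u : Char) (xs : List Char) (hfalse : pvTestA (u :: xs) 0 = false) :
    List.countP (pvTestA (u :: xs)) (PySem.List.pyRange 0 (((u :: xs).length : Int) - 2)) =
      List.countP (pvTestA xs) (PySem.List.pyRange 0 ((xs.length : Int) - 2)) := by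
  by_cases h : (0 : Int) < ((u :: xs).length : Int) - 2
  · rw [PySem.List.pyRange_one_cons h, List.countP_cons]
    rw [show (((u :: xs).length : Int) - 2) = ((xs.length : Int) - 1) from by
      push_cast [List.length_cons]; ring]
    rw [show (0 : Int) + 1 = 1 from by ring, pvCountP_shift, hfalse]
    simp
  · have h1 : PySem.List.pyRange 0 (((u :: xs).length : Int) - 2) = [] :=
      PySem.List.pyRange_one_eq_nil (by omega)
    have h2 : PySem.List.pyRange 0 ((xs.length : Int) - 2) = [] :=
      PySem.List.pyRange_one_eq_nil (by simp at h ⊢; omega)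
    rw [h1, h2]
    simp

lemma pvCnt (l : List Char) :
    (List.countP (pvTestA l) (PySem.List.pyRange 0 ((l.length : Int) - 2)) : Int) =
      pvRegexScan l := by
  induction l using pvRegexScan.induct with
  | case1 a b c t hguard ih =>
    have hc' : pvIsVowelB c = false := by
      rw [Bool.and_eq_true, Bool.and_eq_true] at hguard
      simpa using hguard.2
    have hlen : (0 : Int) < ((a :: b :: c :: t).length : Int) - 2 := by
      push_cast [List.length_cons]; omega
    have h0 : pvTestA (a :: b :: c :: t) 0 = true := by
      rw [pvTestA_zero]
      simp only [List.getElem?_cons_zero, pvInVowelsA_eq]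
      exact hguard
    rw [PySem.List.pyRange_one_cons hlen, List.countP_cons, h0]
    simp only [if_true]
    rw [show (((a :: b :: c :: t).length : Int) - 2) = (((b :: c :: t).length : Int) - 1) from by
      push_cast [List.length_cons]; ring]
    rw [show (0 : Int) + 1 = 1 from by ring, pvCountP_shift]
    have s1 : pvTestA (b :: c :: t) 0 = false := by
      rw [pvTestA_zero]; simp [hc']
    have s2 : pvTestA (c :: t) 0 = false := by
      cases t with
      | nil =>
        unfold pvTestA
        have g0 : PySem.List.pyGet? [c] (0 : Int) = some c := by
          simpa using PySem.List.pyGet?_natCast [c] 0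
        rw [g0, pvInVowelsA_eq, hc']
        simp
      | cons d t' =>
        rw [pvTestA_zero]; simp [hc']
    rw [pvCount_skip b (c :: t) s1, pvCount_skip c t s2]
    rw [show pvRegexScan (a :: b :: c :: t) = 1 + pvRegexScan t from by
      rw [pvRegexScan]; simp [hguard]]
    rw [← ih]
    push_cast
    ring
  | case2 a b c t hguard ih =>
    have hlen : (0 : Int) < ((a :: b :: c :: t).length : Int) - 2 := by
      push_cast [List.length_cons]; omega
    have h0 : pvTestA (a :: b :: c :: t) 0 = false := by
      rw [pvTestA_zero]
      simp only [List.getElem?_cons_zero, pvInVowelsA_eq]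
      exact Bool.not_eq_true _ ▸ (by simpa using hguard)
    rw [PySem.List.pyRange_one_cons hlen, List.countP_cons, h0]
    simp only [if_neg Bool.false_ne_true, Nat.add_zero]
    rw [show (((a :: b :: c :: t).length : Int) - 2) = (((b :: c :: t).length : Int) - 1) from by
      push_cast [List.length_cons]; ring]
    rw [show (0 : Int) + 1 = 1 from by ring, pvCountP_shift, ih]
    rw [show pvRegexScan (a :: b :: c :: t) = pvRegexScan (b :: c :: t) from by
      rw [pvRegexScan]; simp [hguard]]
  | case3 l hshape =>
    have hlen : l.length ≤ 2 := by
      rcases l with _ | ⟨a, _ | ⟨b, _ | ⟨c, t⟩⟩⟩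
      · simp
      · simp
      · simp
      · exact absurd rfl (hshape a b c t)
    have hnil : PySem.List.pyRange 0 ((l.length : Int) - 2) = [] :=
      PySem.List.pyRange_one_eq_nil (by omega)
    rw [hnil]
    rcases l with _ | ⟨a, _ | ⟨b, _ | ⟨c, t⟩⟩⟩
    · simp [pvRegexScan]
    · simp [pvRegexScan]
    · simp [pvRegexScan]
    · exact absurd rfl (hshape a b c t)

-- ===== VERDICT (by name: the statement is the Claim_ definition above) =====
theorem count_diphthongs_spec : Claim_equal_count_diphthongs := by
  intro x _
  show count_diphthongs x = count_diphthongs_alt x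
  rw [pvA_eq_countP, pvCnt]
  rfl
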